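-- pv_equiv track=rewrite | github.com/htpai/EyeTracking | Tobii trans RG.py | classify_lookzone
-- ===== SOURCE A (Python) =====
-- def classify_lookzone(row, aoi_columns):
--     zones_with_one = [col for col in aoi_columns if row[col] == 1]
--     non_framework_zones = [zone for zone in zones_with_one if 'framework' not in zone]
--     framework_zones = [zone for zone in zones_with_one if 'framework' in zone]
--     non_article_zones = [zone for zone in zones_with_one if 'article' not in zone]
--     article_zones = [zone for zone in zones_with_one if 'article' in zone]
--
--     if len(zones_with_one) >= 2:
--         return non_framework_zones[0] if non_framework_zones else framework_zones[0]
--         return non_article_zones[0] if non_article_zones else article_zones[0]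
--     elif len(zones_with_one) == 1:
--         return zones_with_one[0]
--     else:
--         return 'Out'
-- ===== SOURCE B (Python) =====
-- def classify_lookzone(row, aoi_columns):
--     first_any = None
--     first_nonfw = None
--     for col in aoi_columns:
--         if row[col] == 1:
--             if first_any is None:
--                 first_any = col
--             if first_nonfw is None and 'framework' not in col:
--                 first_nonfw = col
--     if first_any is None:
--         return 'Out'
--     return first_nonfw if first_nonfw is not None else first_any
-- ===== Notes on version B (the rewrite author's own statement) =====
-- stated objective: simpler
-- what changed: Replaces the five list comprehensions (two of them dead) and the branch on len(zones_with_one) by a single pass over aoi_columns that remembers only the first matching column and the first non-framework matching column.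
import Mathlib
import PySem

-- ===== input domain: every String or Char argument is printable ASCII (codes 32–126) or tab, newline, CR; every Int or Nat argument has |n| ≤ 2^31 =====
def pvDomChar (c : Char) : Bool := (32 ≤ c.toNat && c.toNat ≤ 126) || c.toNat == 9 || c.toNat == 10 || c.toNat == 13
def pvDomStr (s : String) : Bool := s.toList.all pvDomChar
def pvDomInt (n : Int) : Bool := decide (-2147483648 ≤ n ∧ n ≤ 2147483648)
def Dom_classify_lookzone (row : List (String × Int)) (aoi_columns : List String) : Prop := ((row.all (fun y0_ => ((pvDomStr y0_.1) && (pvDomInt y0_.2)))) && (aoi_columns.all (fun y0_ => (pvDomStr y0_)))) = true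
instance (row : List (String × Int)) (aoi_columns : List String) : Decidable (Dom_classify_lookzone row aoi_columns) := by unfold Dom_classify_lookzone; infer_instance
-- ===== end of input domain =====

-- B replaces A's five list comprehensions (two dead) and length-branching by a single pass
-- remembering the first matching column and the first non-framework matching column (simpler).

-- ===== PORT A =====
-- row[col] == 1 : a missing key is a KeyError in Python (excluded by Pre_); here get? returns none, so the test is false.
def classify_lookzone (row : List (String × Int)) (aoi_columns : List String) : String :=
  let zones_with_one := aoi_columns.filter (fun col => (PySem.Dict.mk row).get? col == some (1 : Int))
  let non_framework_zones := zones_with_one.filter (fun z => !(PySem.Str.isIn "framework" z))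
  let framework_zones := zones_with_one.filter (fun z => PySem.Str.isIn "framework" z)
  let _non_article_zones := zones_with_one.filter (fun z => !(PySem.Str.isIn "article" z))
  let _article_zones := zones_with_one.filter (fun z => PySem.Str.isIn "article" z)
  if 2 ≤ zones_with_one.length then
    match non_framework_zones with
    | z :: _ => z
    | [] =>
      match framework_zones with
      | z :: _ => z
      | [] => "Out"   -- framework_zones[0]: empty is unreachable here (would be IndexError)
  else if zones_with_one.length == 1 then
    match zones_with_one with
    | z :: _ => z
    | [] => "Out"     -- unreachable (length == 1)
  else "Out"

-- ===== PORT B =====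
def classify_lookzone_alt (row : List (String × Int)) (aoi_columns : List String) : String :=
  let st := aoi_columns.foldl (fun (s : Option String × Option String) col =>
      if (PySem.Dict.mk row).get? col == some (1 : Int) then
        (if s.1.isNone then some col else s.1,
         if s.2.isNone && !(PySem.Str.isIn "framework" col) then some col else s.2)
      else s) (none, none)
  match st.1 with
  | none => "Out"
  | some first_any =>
    match st.2 with
    | some first_nonfw => first_nonfw
    | none => first_any

-- ===== PRECONDITION & SPEC =====
-- Pre_ excludes only inputs where A raises KeyError: some aoi column absent from row.
def Pre_classify_lookzone (row : List (String × Int)) (aoi_columns : List String) : Prop :=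
  aoi_columns.all (fun col => (PySem.Dict.mk row).contains col) = true
instance (row : List (String × Int)) (aoi_columns : List String) : Decidable (Pre_classify_lookzone row aoi_columns) := by unfold Pre_classify_lookzone; infer_instance
def pvWitness_classify_lookzone : (List (String × Int)) × List String :=
  ([("frameworkA", 1), ("text", 1)], ["frameworkA", "text"])
def Spec_classify_lookzone (row : List (String × Int)) (aoi_columns : List String) (out : String) : Prop := out = classify_lookzone_alt row aoi_columns
instance (row : List (String × Int)) (aoi_columns : List String) (out : String) : Decidable (Spec_classify_lookzone row aoi_columns out) := by unfold Spec_classify_lookzone; infer_instance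

-- ===== CLAIM (what is proved, stated in full; the proofs are below) =====
def Claim_equal_classify_lookzone : Prop := ∀ (row : List (String × Int)) (aoi_columns : List String), Dom_classify_lookzone row aoi_columns → Pre_classify_lookzone row aoi_columns → Spec_classify_lookzone row aoi_columns (classify_lookzone row aoi_columns)

-- ===== LEMMAS AND PROOFS =====

-- The fold of B computes the heads of A's filtered lists.
theorem fold_first (row : List (String × Int)) (l : List String) (s : Option String × Option String) :
    l.foldl (fun (s : Option String × Option String) col =>
      if (PySem.Dict.mk row).get? col == some (1 : Int) then
        (if s.1.isNone then some col else s.1,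
         if s.2.isNone && !(PySem.Str.isIn "framework" col) then some col else s.2)
      else s) s
    = ((s.1.or (l.filter (fun col => (PySem.Dict.mk row).get? col == some (1 : Int))).head?),
       (s.2.or ((l.filter (fun col => (PySem.Dict.mk row).get? col == some (1 : Int))).filter
          (fun z => !(PySem.Str.isIn "framework" z))).head?)) := by
  induction l generalizing s with
  | nil => simp
  | cons c t ih =>
    by_cases hp : ((PySem.Dict.mk row).get? c == some (1 : Int)) = true
    · simp only [List.foldl_cons, hp, if_pos, List.filter_cons, ih]
      cases h1 : s.1 <;> cases h2 : s.2 <;>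
        by_cases hq : (PySem.Str.isIn "framework" c) = true <;>
        simp_all [Option.or]
    · simp only [List.foldl_cons, List.filter_cons, hp, ih]
      simp

theorem filter_neg_eq_self_of_filter_nil {α : Type} (p : α → Bool) (l : List α)
    (h : l.filter p = []) : l.filter (fun x => !(p x)) = l := by
  rw [List.filter_eq_self]
  intro a ha
  simp only [Bool.not_eq_true']
  by_contra hc
  have : a ∈ l.filter p := List.mem_filter.mpr ⟨ha, by simpa using hc⟩
  simp [h] at this

-- ===== VERDICT (by name: the statement is the Claim_ definition above) =====
theorem classify_lookzone_spec : Claim_equal_classify_lookzone := by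
  intro row aoi _ _
  show classify_lookzone row aoi = classify_lookzone_alt row aoi
  unfold classify_lookzone classify_lookzone_alt
  rw [fold_first]
  set p : String → Bool := fun col => (PySem.Dict.mk row).get? col == some (1 : Int) with hp
  set q : String → Bool := fun z => !(PySem.Str.isIn "framework" z) with hq
  simp only [Option.none_or]
  cases hz : aoi.filter p with
  | nil => simp
  | cons z zs =>
    cases zs with
    | nil =>
      -- exactly one zone: the non-framework filter of [z] is [z] or []
      simp only [List.head?_cons, List.length_cons, List.length_nil]
      by_cases hqz : q z = true <;> simp [hqz]
    | cons z2 zs2 =>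
      have hlen : 2 ≤ (z :: z2 :: zs2).length := by simp
      simp only [List.head?_cons, if_pos hlen]
      cases hnf : (z :: z2 :: zs2).filter q with
      | nil =>
        have hfw : (z :: z2 :: zs2).filter (fun x => !(q x)) = z :: z2 :: zs2 :=
          filter_neg_eq_self_of_filter_nil q _ hnf
        have hfw' : (z :: z2 :: zs2).filter (fun x => PySem.Str.isIn "framework" x) = z :: z2 :: zs2 := by
          have h2 : (z :: z2 :: zs2).filter (fun x => PySem.Str.isIn "framework" x)
              = (z :: z2 :: zs2).filter (fun x => !(q x)) :=
            List.filter_congr (fun a _ => by simp [hq])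
          rw [h2, hfw]
        rw [hfw']
        rfl
      | cons w ws => simp
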